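-- pv_equiv track=rewrite | github.com/pisterlabs/promptset | data/scraping-2.0/repos/CCityCapital~SearchEngine/corpus_query~services~ingestion~chunk.py | chunk_file_by_line
-- ===== SOURCE A (Python) =====
-- from typing import Generator, Optional
--
-- def chunk_file_by_line(corpus_string: str) -> Generator[str, None, None]:
--     """
--     Chunk a corpus string into smaller strings.
--     """
--     prev_line = None
--     for line in corpus_string.split("\n"):
--         stripped_line = line.strip()
--         if len(stripped_line) == 0:
--             continue
--         if prev_line is not None:
--             yield " ".join([prev_line, stripped_line])
--
--         prev_line = stripped_line
-- ===== SOURCE B (Python) =====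
-- def chunk_file_by_line(corpus_string: str):
--     """
--     Chunk a corpus string into smaller strings.
--     """
--     prev = None     # last completed non-empty line, already stripped
--     cur = ""        # stripped-so-far content of the current line
--     pending = ""    # whitespace seen after some content (interior if more content follows)
--     for ch in corpus_string + "\n":
--         if ch == "\n":
--             if cur:
--                 if prev is not None:
--                     yield prev + " " + cur
--                 prev = cur
--             cur = ""
--             pending = ""
--         elif ch.isspace():
--             if cur:
--                 pending += ch
--         else:
--             cur += pending + ch
--             pending = ""
-- ===== Notes on version B (the rewrite author's own statement) =====
-- stated objective: alternative
-- what changed: Replaces A's pipeline of line splitting + per-line strip + previous-line pairing by a single character-level state machine that scans the string once, doing the whitespace trimming (cur/pending buffers) and the pairing of consecutive non-empty lines itself, never calling split, strip or join; it trades A's fast C-implemented string methods for explicit per-character work.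
import Mathlib
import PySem

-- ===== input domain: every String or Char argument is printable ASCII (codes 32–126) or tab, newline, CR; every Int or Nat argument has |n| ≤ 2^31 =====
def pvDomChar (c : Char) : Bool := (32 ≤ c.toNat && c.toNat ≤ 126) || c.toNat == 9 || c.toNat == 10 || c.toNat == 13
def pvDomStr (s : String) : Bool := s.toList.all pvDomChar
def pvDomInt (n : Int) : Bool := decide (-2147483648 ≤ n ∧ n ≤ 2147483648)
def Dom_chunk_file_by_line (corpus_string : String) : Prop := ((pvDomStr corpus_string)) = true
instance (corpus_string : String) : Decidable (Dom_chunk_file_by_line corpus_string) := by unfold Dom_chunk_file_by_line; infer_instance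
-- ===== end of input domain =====

-- B replaces A's split/strip/pair-up pipeline by a single character-level state machine that strips and pairs lines in one scan (alternative decomposition; generator return value compared as a list).


-- ===== PORT A =====
-- the generator's for-loop: state is prev_line (None or the last non-empty stripped line); each yield conses to the output
def chunkLoopA : Option String → List String → List String
  | _, [] => []
  | prev, line :: rest =>
    let stripped := PySem.Str.strip line
    if PySem.Str.len stripped == 0 then
      chunkLoopA prev rest
    else
      match prev with
      | none => chunkLoopA (some stripped) rest
      | some p => PySem.Str.join " " [p, stripped] :: chunkLoopA (some stripped) rest

def chunk_file_by_line (corpus_string : String) : List String :=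
  chunkLoopA none ((PySem.Str.split? corpus_string "\n").getD [])

-- ===== PORT B =====
-- B's state machine step: strings are ported as List Char; state = (yielded output, prev, cur, pending)
def pvStepB (st : List (List Char) × Option (List Char) × List Char × List Char) (ch : Char) :
    List (List Char) × Option (List Char) × List Char × List Char :=
  match st with
  | (out, prev, cur, pending) =>
    if ch = '\n' then
      if cur = [] then (out, prev, [], [])
      else
        match prev with
        | some p => (out ++ [p ++ ' ' :: cur], some cur, [], [])
        | none => (out, some cur, [], [])
    else if PySem.Chars.isspace ch then
      if cur = [] then (out, prev, cur, pending) else (out, prev, cur, pending ++ [ch])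
    else (out, prev, cur ++ pending ++ [ch], [])

-- foldl over the characters of corpus_string + "\n"; the .1 component collects the yields in order
def chunk_file_by_line_alt (corpus_string : String) : List String :=
  (((corpus_string.toList ++ ['\n']).foldl pvStepB ([], none, [], [])).1).map String.ofList

-- ===== PRECONDITION & SPEC =====
def Spec_chunk_file_by_line (corpus_string : String) (out : List String) : Prop := out = chunk_file_by_line_alt corpus_string
instance (corpus_string : String) (out : List String) : Decidable (Spec_chunk_file_by_line corpus_string out) := by unfold Spec_chunk_file_by_line; infer_instance

-- ===== CLAIM (what is proved, stated in full; the proofs are below) =====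
def Claim_equal_chunk_file_by_line : Prop := ∀ (corpus_string : String), Dom_chunk_file_by_line corpus_string → Spec_chunk_file_by_line corpus_string (chunk_file_by_line corpus_string)

-- ===== LEMMAS AND PROOFS =====

-- splitting on '\n' as a structural recursion, to reason about PySem's fueled splitOn
def pvSplitNL : List Char → List (List Char)
  | [] => [[]]
  | c :: rest =>
    if c = '\n' then [] :: pvSplitNL rest
    else
      match pvSplitNL rest with
      | [] => [[c]]
      | r :: rs => (c :: r) :: rs

lemma pvSplitNL_ne_nil (cs : List Char) : pvSplitNL cs ≠ [] := by
  cases cs with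
  | nil => simp [pvSplitNL]
  | cons c rest =>
    simp only [pvSplitNL]
    split
    · simp
    · split <;> simp

lemma go_eq : ∀ (l : List Char) (fuel : Nat), l.length < fuel → ∀ (cur : List Char) (acc : List (List Char)),
    PySem.Chars.splitOn.go ['\n'] fuel l cur acc
      = acc.reverse ++ (cur.reverse ++ (pvSplitNL l).headI) :: (pvSplitNL l).tail := by
  intro l
  induction l with
  | nil =>
    intro fuel hf cur acc
    cases fuel with
    | zero => omega
    | succ f => simp [PySem.Chars.splitOn.go, pvSplitNL]
  | cons c rest ih =>
    intro fuel hf cur acc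
    cases fuel with
    | zero => simp at hf
    | succ f =>
      rw [PySem.Chars.splitOn.go]
      by_cases hc : c = '\n'
      · subst hc
        have hpre : List.isPrefixOf ['\n'] ('\n' :: rest) = true := by
          simp [List.isPrefixOf]
        simp only [hpre, if_pos, List.length_cons, List.length_nil, Nat.zero_add, List.drop_succ_cons, List.drop_zero]
        rw [ih f (by simpa using hf) [] (cur.reverse :: acc)]
        rcases h : pvSplitNL rest with _ | ⟨r, rs⟩
        · exact absurd h (pvSplitNL_ne_nil rest)
        · simp [pvSplitNL, h]
      · have hpre : List.isPrefixOf ['\n'] (c :: rest) = false := by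
          simp [List.isPrefixOf]; exact fun h => hc h.symm
        simp only [hpre, Bool.false_eq_true, if_false]
        rw [ih f (by simpa using hf) (c :: cur) acc]
        simp only [pvSplitNL, if_neg hc]
        rcases h : pvSplitNL rest with _ | ⟨r, rs⟩
        · exact absurd h (pvSplitNL_ne_nil rest)
        · simp

lemma splitOn_eq (cs : List Char) :
    PySem.Chars.splitOn cs ['\n'] = pvSplitNL cs := by
  rw [PySem.Chars.splitOn, go_eq cs (cs.length + 1) (by omega)]
  rcases h : pvSplitNL cs with _ | ⟨r, rs⟩
  · exact absurd h (pvSplitNL_ne_nil cs)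
  · simp

lemma rstrip_append_cons (xs ys : List Char) (c : Char) (hc : PySem.Chars.isspace c = false) :
    PySem.Chars.rstrip (xs ++ c :: ys) = xs ++ c :: PySem.Chars.rstrip ys := by
  simp only [PySem.Chars.rstrip, List.reverse_append, List.reverse_cons, List.append_assoc,
    List.dropWhile_append]
  split
  · rename_i h
    simp only [List.isEmpty_iff, List.dropWhile_eq_nil_iff] at h
    rw [List.dropWhile_eq_nil_iff.mpr h]
    simp [hc]
  · rename_i h
    simp only [List.isEmpty_iff] at h
    simp

-- scanning the rest of a line once some content is in cur: cur accumulates the rstrip of what remains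
lemma scan_line_aux : ∀ (cs : List Char), '\n' ∉ cs →
    ∀ (out : List (List Char)) (prev : Option (List Char)) (cur pending : List Char),
      cur ≠ [] → (∀ x ∈ pending, PySem.Chars.isspace x = true) →
      ∃ pending', (∀ x ∈ pending', PySem.Chars.isspace x = true) ∧
        List.foldl pvStepB (out, prev, cur, pending) cs
          = (out, prev, cur ++ PySem.Chars.rstrip (pending ++ cs), pending') := by
  intro cs
  induction cs with
  | nil =>
    intro _ out prev cur pending _ hp
    refine ⟨pending, hp, ?_⟩
    simp only [List.foldl_nil, List.append_nil]
    have : PySem.Chars.rstrip pending = [] := by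
      simp only [PySem.Chars.rstrip, List.reverse_eq_nil_iff]
      rw [List.dropWhile_eq_nil_iff]
      intro x hx
      exact hp x (by simpa using hx)
    simp [this]
  | cons c rest ih =>
    intro hn out prev cur pending hcur hp
    have hc : c ≠ '\n' := fun h => hn (h ▸ List.mem_cons_self)
    have hn' : '\n' ∉ rest := fun h => hn (List.mem_cons_of_mem _ h)
    by_cases hs : PySem.Chars.isspace c = true
    · have hstep : pvStepB (out, prev, cur, pending) c = (out, prev, cur, pending ++ [c]) := by
        simp [pvStepB, hc, hs, hcur]
      obtain ⟨p', hp', heq⟩ := ih hn' out prev cur (pending ++ [c]) hcur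
        (by intro x hx; rcases List.mem_append.mp hx with h | h
            · exact hp x h
            · simp at h; subst h; exact hs)
      refine ⟨p', hp', ?_⟩
      rw [List.foldl_cons, hstep, heq]
      simp
    · have hstep : pvStepB (out, prev, cur, pending) c = (out, prev, cur ++ pending ++ [c], []) := by
        simp [pvStepB, hc, hs]
      obtain ⟨p', hp', heq⟩ := ih hn' out prev (cur ++ pending ++ [c]) [] (by simp) (by simp)
      refine ⟨p', hp', ?_⟩
      rw [List.foldl_cons, hstep, heq, rstrip_append_cons pending rest c (by simpa using hs)]
      simp

-- scanning one whole '\n'-free line from a fresh line state computes its strip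
lemma scan_line : ∀ (cs : List Char), '\n' ∉ cs →
    ∀ (out : List (List Char)) (prev : Option (List Char)),
      ∃ pending', List.foldl pvStepB (out, prev, [], []) cs
        = (out, prev, PySem.Chars.strip cs, pending') := by
  intro cs
  induction cs with
  | nil =>
    intro _ out prev
    exact ⟨[], by simp [PySem.Chars.strip, PySem.Chars.lstrip, PySem.Chars.rstrip]⟩
  | cons c rest ih =>
    intro hn out prev
    have hc : c ≠ '\n' := fun h => hn (h ▸ List.mem_cons_self)
    have hn' : '\n' ∉ rest := fun h => hn (List.mem_cons_of_mem _ h)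
    by_cases hs : PySem.Chars.isspace c = true
    · obtain ⟨p', heq⟩ := ih hn' out prev
      refine ⟨p', ?_⟩
      have hstep : pvStepB (out, prev, [], []) c = (out, prev, [], []) := by
        simp [pvStepB, hc, hs]
      rw [List.foldl_cons, hstep, heq]
      simp [PySem.Chars.strip, PySem.Chars.lstrip, hs]
    · have hstep : pvStepB (out, prev, [], []) c = (out, prev, [c], []) := by
        simp [pvStepB, hc, hs]
      obtain ⟨p', hp', heq⟩ := scan_line_aux rest hn' out prev [c] [] (by simp) (by simp)
      refine ⟨p', ?_⟩
      rw [List.foldl_cons, hstep, heq]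
      have : PySem.Chars.strip (c :: rest) = c :: PySem.Chars.rstrip rest := by
        rw [PySem.Chars.strip]
        rw [show PySem.Chars.lstrip (c :: rest) = c :: rest by
          simp [PySem.Chars.lstrip, hs]]
        simpa using rstrip_append_cons [] rest c (by simpa using hs)
      simp [this]

-- char-level version of A's loop
def chunkLoopC : Option (List Char) → List (List Char) → List (List Char)
  | _, [] => []
  | prev, l :: rest =>
    if PySem.Chars.strip l = [] then chunkLoopC prev rest
    else
      match prev with
      | none => chunkLoopC (some (PySem.Chars.strip l)) rest
      | some p => (p ++ ' ' :: PySem.Chars.strip l) :: chunkLoopC (some (PySem.Chars.strip l)) rest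

def pvJoinNL (ls : List (List Char)) : List Char := ls.foldr (fun l acc => l ++ '\n' :: acc) []

lemma chunkLoopA_eq_C : ∀ (L : List (List Char)) (prev : Option (List Char)),
    chunkLoopA (prev.map String.ofList) (L.map String.ofList) = (chunkLoopC prev L).map String.ofList := by
  intro L
  induction L with
  | nil => intro prev; simp [chunkLoopA, chunkLoopC]
  | cons l rest ih =>
    intro prev
    have hst : PySem.Str.strip (String.ofList l) = String.ofList (PySem.Chars.strip l) := by
      apply String.toList_inj.mp
      simp [PySem.Str.toList_strip]
    by_cases h : PySem.Chars.strip l = []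
    · cases prev with
      | none =>
        simp only [chunkLoopA, chunkLoopC, hst, h, PySem.Str.len_eq, List.map_cons]
        simp only [if_pos]
        simpa using ih none
      | some p =>
        simp only [chunkLoopA, chunkLoopC, hst, h, PySem.Str.len_eq, List.map_cons]
        simp only [if_pos]
        simpa using ih (some p)
    · have hlen : ¬ (PySem.Chars.strip l).length = 0 := by simpa [List.length_eq_zero_iff] using h
      have hjoin : ∀ p : List Char,
          PySem.Str.join " " [String.ofList p, String.ofList (PySem.Chars.strip l)]
            = String.ofList (p ++ ' ' :: PySem.Chars.strip l) := by
        intro p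
        apply String.toList_inj.mp
        simp [PySem.Str.toList_join, PySem.Chars.join, List.intercalate, List.intersperse]
      cases prev with
      | none => simpa [chunkLoopA, chunkLoopC, hst, h, PySem.Str.len_eq, hlen] using ih (some (PySem.Chars.strip l))
      | some p =>
        simpa [chunkLoopA, chunkLoopC, hst, h, PySem.Str.len_eq, hlen, hjoin]
          using ih (some (PySem.Chars.strip l))

lemma splitNL_no_nl : ∀ (cs : List Char), ∀ l ∈ pvSplitNL cs, '\n' ∉ l := by
  intro cs
  induction cs with
  | nil => simp [pvSplitNL]
  | cons c rest ih =>
    by_cases hc : c = '\n'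
    · subst hc
      simp only [pvSplitNL, if_pos]
      intro l hl
      rcases List.mem_cons.mp hl with h | h
      · subst h; simp
      · exact ih l h
    · simp only [pvSplitNL, if_neg hc]
      rcases h : pvSplitNL rest with _ | ⟨r, rs⟩
      · exact absurd h (pvSplitNL_ne_nil rest)
      · intro l hl
        rcases List.mem_cons.mp hl with h1 | h1
        · subst h1
          intro hmem
          rcases List.mem_cons.mp hmem with h2 | h2
          · exact hc h2.symm
          · exact ih r (by simp [h]) h2
        · exact ih l (by simp [h, h1])

lemma joinNL_splitNL : ∀ (cs : List Char), pvJoinNL (pvSplitNL cs) = cs ++ ['\n'] := by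
  intro cs
  induction cs with
  | nil => simp [pvSplitNL, pvJoinNL]
  | cons c rest ih =>
    by_cases hc : c = '\n'
    · subst hc
      have hs : pvSplitNL ('\n' :: rest) = [] :: pvSplitNL rest := by simp [pvSplitNL]
      rw [hs]
      show [] ++ '\n' :: pvJoinNL (pvSplitNL rest) = ('\n' :: rest) ++ ['\n']
      rw [ih]
      simp
    · simp only [pvSplitNL, if_neg hc]
      rcases h : pvSplitNL rest with _ | ⟨r, rs⟩
      · exact absurd h (pvSplitNL_ne_nil rest)
      · have : pvJoinNL (r :: rs) = rest ++ ['\n'] := by rw [← h, ih]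
        simp only [pvJoinNL, List.foldr_cons] at this ⊢
        simp [this]

-- the machine over the concatenation of the lines (each followed by '\n') yields exactly A's loop output
lemma scan_main : ∀ (lines : List (List Char)), (∀ l ∈ lines, '\n' ∉ l) →
    ∀ (out : List (List Char)) (prev : Option (List Char)),
      (List.foldl pvStepB (out, prev, [], []) (pvJoinNL lines)).1 = out ++ chunkLoopC prev lines := by
  intro lines
  induction lines with
  | nil => intro _ out prev; simp [pvJoinNL, chunkLoopC]
  | cons l rest ih =>
    intro hno out prev
    have hl : '\n' ∉ l := hno l List.mem_cons_self
    have hrest : ∀ l' ∈ rest, '\n' ∉ l' := fun l' h => hno l' (List.mem_cons_of_mem _ h)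
    have hjoin : pvJoinNL (l :: rest) = l ++ '\n' :: pvJoinNL rest := by simp [pvJoinNL]
    obtain ⟨p', hline⟩ := scan_line l hl out prev
    rw [hjoin, List.foldl_append, hline, List.foldl_cons]
    by_cases h : PySem.Chars.strip l = []
    · have hstep : pvStepB (out, prev, PySem.Chars.strip l, p') '\n' = (out, prev, [], []) := by
        simp [pvStepB, h]
      rw [hstep, ih hrest]
      simp [chunkLoopC, h]
    · cases prev with
      | none =>
        have hstep : pvStepB (out, none, PySem.Chars.strip l, p') '\n'
            = (out, some (PySem.Chars.strip l), [], []) := by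
          simp [pvStepB, h]
        rw [hstep, ih hrest]
        simp [chunkLoopC, h]
      | some p =>
        have hstep : pvStepB (out, some p, PySem.Chars.strip l, p') '\n'
            = (out ++ [p ++ ' ' :: PySem.Chars.strip l], some (PySem.Chars.strip l), [], []) := by
          simp [pvStepB, h]
        rw [hstep, ih hrest]
        simp [chunkLoopC, h]

-- ===== VERDICT (by name: the statement is the Claim_ definition above) =====
theorem chunk_file_by_line_spec : Claim_equal_chunk_file_by_line := by
  intro s _
  unfold Spec_chunk_file_by_line
  unfold chunk_file_by_line chunk_file_by_line_alt
  have hsplit : (PySem.Str.split? s "\n").getD [] = (pvSplitNL s.toList).map String.ofList := by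
    rw [PySem.Str.split?]
    simp [PySem.Chars.split?, splitOn_eq]
  rw [hsplit, show (none : Option String) = Option.map String.ofList none from rfl, chunkLoopA_eq_C,
    show s.toList ++ ['\n'] = pvJoinNL (pvSplitNL s.toList) from (joinNL_splitNL s.toList).symm,
    scan_main (pvSplitNL s.toList) (splitNL_no_nl s.toList) [] none]
  simp
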